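-- pv_equiv track=rewrite | github.com/arya-kumar1/CarbonPlay | scheduler/optimizer.py | _regular_pair_expansion
-- ===== SOURCE A (Python) =====
-- from typing import Dict, List, Set, Tuple
--
-- def _regular_pair_expansion(codes: List[str], degree: int) -> List[Tuple[str, str]]:
--     n = len(codes)
--     if degree < 0 or degree > n - 1:
--         raise ValueError(f"Invalid regular degree {degree} for {n} teams")
--     if (n * degree) % 2 != 0:
--         raise ValueError(f"Cannot build {degree}-regular pairing on {n} teams")
--
--     edges: set[Tuple[str, str]] = set()
--     half = degree // 2
--
--     for i in range(n):
--         for step in range(1, half + 1):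
--             j = (i + step) % n
--             a, b = sorted((codes[i], codes[j]))
--             edges.add((a, b))
--
--     if degree % 2 == 1:
--         if n % 2 != 0:
--             raise ValueError(f"Odd degree {degree} requires an even number of teams, got {n}")
--         for i in range(n // 2):
--             j = i + (n // 2)
--             a, b = sorted((codes[i], codes[j]))
--             edges.add((a, b))
--
--     return sorted(edges)
-- ===== SOURCE B (Python) =====
-- from typing import List, Tuple
--
-- def _regular_pair_expansion(codes: List[str], degree: int) -> List[Tuple[str, str]]:
--     n = len(codes)
--     if degree < 0 or degree > n - 1:
--         raise ValueError(f"Invalid regular degree {degree} for {n} teams")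
--     if (n * degree) % 2 != 0:
--         raise ValueError(f"Cannot build {degree}-regular pairing on {n} teams")
--
--     # Circulant-graph characterisation: an unordered index pair (i, j), i < j, is an
--     # edge exactly when its circular distance min(j-i, n-(j-i)) is at most degree//2,
--     # or when degree is odd and the pair is antipodal (2*(j-i) == n).
--     half = degree // 2
--     edges = set()
--     for i in range(n):
--         for j in range(i + 1, n):
--             d = j - i
--             if min(d, n - d) <= half or (degree % 2 == 1 and 2 * d == n):
--                 x, y = codes[i], codes[j]
--                 edges.add((x, y) if x <= y else (y, x))
--     return sorted(edges)
-- ===== Notes on version B (the rewrite author's own statement) =====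
-- stated objective: alternative
-- what changed: B replaces A's edge-generation by offset rotations (plus a separate half-range antipodal loop) with a membership test: it scans every unordered index pair i<j once and keeps it iff its circular distance min(j-i, n-(j-i)) is at most degree//2 or (degree odd) the pair is antipodal.
import Mathlib
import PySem

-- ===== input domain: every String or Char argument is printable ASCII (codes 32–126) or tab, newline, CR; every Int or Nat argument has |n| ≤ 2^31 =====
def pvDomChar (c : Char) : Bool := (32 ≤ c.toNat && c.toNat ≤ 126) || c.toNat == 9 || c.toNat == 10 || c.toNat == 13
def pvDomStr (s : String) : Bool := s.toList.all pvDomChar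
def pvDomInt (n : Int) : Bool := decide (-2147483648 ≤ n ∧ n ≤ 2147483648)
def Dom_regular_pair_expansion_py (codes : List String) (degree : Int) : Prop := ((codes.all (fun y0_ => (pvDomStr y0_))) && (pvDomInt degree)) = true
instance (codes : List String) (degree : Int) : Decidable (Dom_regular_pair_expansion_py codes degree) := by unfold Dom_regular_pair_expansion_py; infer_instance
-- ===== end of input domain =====

-- B decides edge membership per unordered index pair by a circular-distance test instead of generating edges by offset rotations (alternative algorithm, same result).

-- shared helper: 'a, b = sorted((x, y))' on a 2-tuple of strings (stable 2-element sort; exact)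
def pvSortPair (x y : String) : String × String := if y < x then (y, x) else (x, y)

-- ===== PORT A =====
-- The ValueError raises are excluded by Pre_; the port computes A's normal path.
def regular_pair_expansion_py (codes : List String) (degree : Int) : List (String × String) :=
  PySem.List.sorted
    (if PySem.Int.mod degree 2 = 1 then
       -- if degree % 2 == 1: for i in range(n // 2): edges.add(sorted((codes[i], codes[i + n//2])))
       (PySem.List.pyRange 0 (PySem.Int.floordiv (codes.length : Int) 2)).foldl
         (fun edges i =>
           PySem.Set.add edges
             (pvSortPair (PySem.List.pyGetD codes i "")
               (PySem.List.pyGetD codes (i + PySem.Int.floordiv (codes.length : Int) 2) "")))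
         -- first loop: for i in range(n): for step in range(1, half + 1): edges.add(sorted((codes[i], codes[(i+step) % n])))
         ((PySem.List.pyRange 0 (codes.length : Int)).foldl
           (fun edges i =>
             (PySem.List.pyRange 1 (PySem.Int.floordiv degree 2 + 1)).foldl
               (fun edges step =>
                 PySem.Set.add edges
                   (pvSortPair (PySem.List.pyGetD codes i "")
                     (PySem.List.pyGetD codes (PySem.Int.mod (i + step) (codes.length : Int)) "")))
               edges)
           (PySem.Set.empty : PySem.Set (String × String)))
     else
       (PySem.List.pyRange 0 (codes.length : Int)).foldl
         (fun edges i =>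
           (PySem.List.pyRange 1 (PySem.Int.floordiv degree 2 + 1)).foldl
             (fun edges step =>
               PySem.Set.add edges
                 (pvSortPair (PySem.List.pyGetD codes i "")
                   (PySem.List.pyGetD codes (PySem.Int.mod (i + step) (codes.length : Int)) "")))
             edges)
         (PySem.Set.empty : PySem.Set (String × String)))
    (fun p => toLex p)

-- ===== PORT B =====
-- for i in range(n): for j in range(i+1, n): keep (i,j) iff min(j-i, n-(j-i)) <= degree//2
-- or (degree odd and 2*(j-i) == n); pair ordered by '<='; sorted at the end.
def regular_pair_expansion_py_alt (codes : List String) (degree : Int) : List (String × String) :=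
  PySem.List.sorted
    ((PySem.List.pyRange 0 (codes.length : Int)).foldl
      (fun edges i =>
        (PySem.List.pyRange (i + 1) (codes.length : Int)).foldl
          (fun edges j =>
            if min (j - i) ((codes.length : Int) - (j - i)) ≤ PySem.Int.floordiv degree 2
               ∨ (PySem.Int.mod degree 2 = 1 ∧ 2 * (j - i) = (codes.length : Int)) then
              PySem.Set.add edges
                (if PySem.List.pyGetD codes i "" ≤ PySem.List.pyGetD codes j "" then
                   (PySem.List.pyGetD codes i "", PySem.List.pyGetD codes j "")
                 else (PySem.List.pyGetD codes j "", PySem.List.pyGetD codes i ""))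
            else edges)
          edges)
      (PySem.Set.empty : PySem.Set (String × String)))
    (fun p => toLex p)

-- ===== PRECONDITION & SPEC =====
-- Pre_ excludes exactly A's ValueError raises: degree outside [0, n-1], or n*degree odd
-- (the third raise — odd degree with odd n — is impossible once n*degree is even).
def Pre_regular_pair_expansion_py (codes : List String) (degree : Int) : Prop :=
  0 ≤ degree ∧ degree ≤ (codes.length : Int) - 1 ∧ PySem.Int.mod ((codes.length : Int) * degree) 2 = 0
instance (codes : List String) (degree : Int) : Decidable (Pre_regular_pair_expansion_py codes degree) := by unfold Pre_regular_pair_expansion_py; infer_instance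
def pvWitness_regular_pair_expansion_py : List String × Int := (["a", "b", "c", "d"], 3)

def Spec_regular_pair_expansion_py (codes : List String) (degree : Int) (out : List (String × String)) : Prop := out = regular_pair_expansion_py_alt codes degree
instance (codes : List String) (degree : Int) (out : List (String × String)) : Decidable (Spec_regular_pair_expansion_py codes degree out) := by unfold Spec_regular_pair_expansion_py; infer_instance

-- ===== CLAIM =====
def Claim_equal_regular_pair_expansion_py : Prop := ∀ (codes : List String) (degree : Int), Dom_regular_pair_expansion_py codes degree → Pre_regular_pair_expansion_py codes degree → Spec_regular_pair_expansion_py codes degree (regular_pair_expansion_py codes degree)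

-- ===== LEMMAS AND PROOFS =====

theorem pvSortPair_comm (x y : String) : pvSortPair x y = pvSortPair y x := by
  unfold pvSortPair
  rcases lt_trichotomy x y with h | h | h
  · rw [if_neg (asymm h), if_pos h]
  · subst h; rfl
  · rw [if_pos h, if_neg (asymm h)]

theorem pvSortPair_le (x y : String) :
    (if x ≤ y then (x, y) else (y, x)) = pvSortPair x y := by
  unfold pvSortPair
  rcases lt_trichotomy x y with h | h | h
  · rw [if_pos h.le, if_neg (asymm h)]
  · subst h; simp
  · rw [if_neg (not_le.mpr h), if_pos h]

theorem pv_mem_foldl_add {α β : Type} [BEq α] [LawfulBEq α] (l : List β) (f : β → α)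
    (s : PySem.Set α) (x : α) :
    x ∈ l.foldl (fun s b => PySem.Set.add s (f b)) s ↔ x ∈ s ∨ ∃ b ∈ l, x = f b := by
  induction l generalizing s with
  | nil => simp
  | cons b t ih => simp [ih, PySem.Set.mem_add]; tauto

theorem pv_nodup_foldl_add {α β : Type} [BEq α] [LawfulBEq α] (l : List β) (f : β → α)
    (s : PySem.Set α) (h : s.Nodup) :
    (l.foldl (fun s b => PySem.Set.add s (f b)) s).Nodup := by
  induction l generalizing s with
  | nil => simpa
  | cons b t ih => exact ih _ (PySem.Set.nodup_add _ _ h)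

theorem pv_mem_foldl_foldl_add {α β γ : Type} [BEq α] [LawfulBEq α] (l : List β)
    (m : β → List γ) (f : β → γ → α) (s : PySem.Set α) (x : α) :
    x ∈ l.foldl (fun s b => (m b).foldl (fun s c => PySem.Set.add s (f b c)) s) s ↔
      x ∈ s ∨ ∃ b ∈ l, ∃ c ∈ m b, x = f b c := by
  induction l generalizing s with
  | nil => simp
  | cons b t ih =>
    simp only [List.foldl_cons, ih, pv_mem_foldl_add, List.mem_cons]
    constructor
    · rintro ((h | ⟨c, hc, rfl⟩) | ⟨b', hb', c, hc, rfl⟩)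
      · exact Or.inl h
      · exact Or.inr ⟨b, Or.inl rfl, c, hc, rfl⟩
      · exact Or.inr ⟨b', Or.inr hb', c, hc, rfl⟩
    · rintro (h | ⟨b', hb', c, hc, rfl⟩)
      · exact Or.inl (Or.inl h)
      · rcases hb' with rfl | hb'
        · exact Or.inl (Or.inr ⟨c, hc, rfl⟩)
        · exact Or.inr ⟨b', hb', c, hc, rfl⟩

theorem pv_nodup_foldl_foldl_add {α β γ : Type} [BEq α] [LawfulBEq α] (l : List β)
    (m : β → List γ) (f : β → γ → α) (s : PySem.Set α) (h : s.Nodup) :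
    (l.foldl (fun s b => (m b).foldl (fun s c => PySem.Set.add s (f b c)) s) s).Nodup := by
  induction l generalizing s with
  | nil => simpa
  | cons b t ih => exact ih _ (pv_nodup_foldl_add _ _ _ h)

theorem pv_mem_foldl_addIf {α β : Type} [BEq α] [LawfulBEq α] (l : List β)
    (P : β → Prop) [∀ b, Decidable (P b)] (f : β → α) (s : PySem.Set α) (x : α) :
    x ∈ l.foldl (fun s b => if P b then PySem.Set.add s (f b) else s) s ↔
      x ∈ s ∨ ∃ b ∈ l, P b ∧ x = f b := by
  induction l generalizing s with
  | nil => simp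
  | cons b t ih =>
    simp only [List.foldl_cons, ih, List.mem_cons]
    by_cases h : P b
    · rw [if_pos h]; simp only [PySem.Set.mem_add]
      constructor
      · rintro ((h1 | rfl) | ⟨b', hb', hp, rfl⟩)
        · exact Or.inl h1
        · exact Or.inr ⟨b, Or.inl rfl, h, rfl⟩
        · exact Or.inr ⟨b', Or.inr hb', hp, rfl⟩
      · rintro (h1 | ⟨b', hb', hp, rfl⟩)
        · exact Or.inl (Or.inl h1)
        · rcases hb' with rfl | hb'
          · exact Or.inl (Or.inr rfl)
          · exact Or.inr ⟨b', hb', hp, rfl⟩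
    · rw [if_neg h]
      constructor
      · rintro (h1 | ⟨b', hb', hp, rfl⟩)
        · exact Or.inl h1
        · exact Or.inr ⟨b', Or.inr hb', hp, rfl⟩
      · rintro (h1 | ⟨b', hb', hp, rfl⟩)
        · exact Or.inl h1
        · rcases hb' with rfl | hb'
          · exact absurd hp h
          · exact Or.inr ⟨b', hb', hp, rfl⟩

theorem pv_nodup_foldl_addIf {α β : Type} [BEq α] [LawfulBEq α] (l : List β)
    (P : β → Prop) [∀ b, Decidable (P b)] (f : β → α) (s : PySem.Set α) (h : s.Nodup) :
    (l.foldl (fun s b => if P b then PySem.Set.add s (f b) else s) s).Nodup := by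
  induction l generalizing s with
  | nil => simpa
  | cons b t ih =>
    by_cases hp : P b
    · simp only [List.foldl_cons, if_pos hp]; exact ih _ (PySem.Set.nodup_add _ _ h)
    · simp only [List.foldl_cons, if_neg hp]; exact ih _ h

theorem pv_mem_foldl_foldl_addIf {α β γ : Type} [BEq α] [LawfulBEq α] (l : List β)
    (m : β → List γ) (P : β → γ → Prop) [∀ b c, Decidable (P b c)] (f : β → γ → α)
    (s : PySem.Set α) (x : α) :
    x ∈ l.foldl (fun s b => (m b).foldl (fun s c => if P b c then PySem.Set.add s (f b c) else s) s) s ↔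
      x ∈ s ∨ ∃ b ∈ l, ∃ c ∈ m b, P b c ∧ x = f b c := by
  induction l generalizing s with
  | nil => simp
  | cons b t ih =>
    simp only [List.foldl_cons, ih, pv_mem_foldl_addIf, List.mem_cons]
    constructor
    · rintro ((h | ⟨c, hc, hp, rfl⟩) | ⟨b', hb', c, hc, hp, rfl⟩)
      · exact Or.inl h
      · exact Or.inr ⟨b, Or.inl rfl, c, hc, hp, rfl⟩
      · exact Or.inr ⟨b', Or.inr hb', c, hc, hp, rfl⟩
    · rintro (h | ⟨b', hb', c, hc, hp, rfl⟩)
      · exact Or.inl (Or.inl h)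
      · rcases hb' with rfl | hb'
        · exact Or.inl (Or.inr ⟨c, hc, hp, rfl⟩)
        · exact Or.inr ⟨b', hb', c, hc, hp, rfl⟩

theorem pv_nodup_foldl_foldl_addIf {α β γ : Type} [BEq α] [LawfulBEq α] (l : List β)
    (m : β → List γ) (P : β → γ → Prop) [∀ b c, Decidable (P b c)] (f : β → γ → α)
    (s : PySem.Set α) (h : s.Nodup) :
    (l.foldl (fun s b => (m b).foldl (fun s c => if P b c then PySem.Set.add s (f b c) else s) s) s).Nodup := by
  induction l generalizing s with
  | nil => simpa
  | cons b t ih => exact ih _ (pv_nodup_foldl_addIf _ _ _ _ h)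

-- ===== VERDICT =====
theorem regular_pair_expansion_py_spec : Claim_equal_regular_pair_expansion_py := by
  intro codes degree _ hpre
  obtain ⟨h0, h1, h2⟩ := hpre
  unfold Spec_regular_pair_expansion_py regular_pair_expansion_py regular_pair_expansion_py_alt
  set n : Int := (codes.length : Int) with hndef
  have hn : (0 : Int) < n := by omega
  set half : Int := PySem.Int.floordiv degree 2 with hhdef
  have hhalf2 : 2 * half ≤ degree ∧ degree < 2 * half + 2 := by
    rw [hhdef, PySem.Int.floordiv_eq_ediv_of_pos (by norm_num)]
    constructor <;> omega
  simp only [pvSortPair_le]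
  apply PySem.List.sorted_eq_sorted_of_perm _ _ _ (fun a b h => by simpa using h)
  by_cases hodd : PySem.Int.mod degree 2 = 1
  · rw [if_pos hodd]
    have hdeg : ¬ (2 : Int) ∣ degree := by
      rw [PySem.Int.mod_eq_emod_of_pos (by norm_num)] at hodd; omega
    have hneven : (2 : Int) ∣ n := by
      have := (PySem.Int.mod_eq_zero_iff_dvd (n * degree) 2).mp h2
      rcases (Int.prime_two.dvd_mul.mp this) with h | h
      · exact h
      · exact absurd h hdeg
    have hh : PySem.Int.floordiv n 2 * 2 = n := by
      rw [PySem.Int.floordiv_eq_ediv_of_pos (by norm_num)]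
      obtain ⟨k, hk⟩ := hneven; omega
    set q : Int := PySem.Int.floordiv n 2 with hqdef
    refine (List.perm_ext_iff_of_nodup
      (pv_nodup_foldl_add _ _ _ (pv_nodup_foldl_foldl_add _ _ _ _ List.nodup_nil))
      (pv_nodup_foldl_foldl_addIf _ _ _ _ _ List.nodup_nil)).mpr ?_
    intro x
    simp only [pv_mem_foldl_add, pv_mem_foldl_foldl_add, pv_mem_foldl_foldl_addIf,
      PySem.List.mem_pyRange_one, List.not_mem_nil, false_or]
    constructor
    · rintro (⟨i, hi, st, hst, rfl⟩ | ⟨i, hi, rfl⟩)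
      · -- even-part edge (i, (i+st) % n), 1 ≤ st ≤ half
        have hstn : st < n := by omega
        by_cases hlt : i + st < n
        · have hm : PySem.Int.mod (i + st) n = i + st := by
            rw [PySem.Int.mod_eq_emod_of_pos hn]
            apply Int.emod_eq_of_lt <;> omega
          refine ⟨i, ⟨hi.1, by omega⟩, i + st, ⟨by omega, by omega⟩, Or.inl ?_, by rw [hm]⟩
          simp only [add_sub_cancel_left]; omega
        · have hm : PySem.Int.mod (i + st) n = i + st - n := by
            rw [PySem.Int.mod_eq_emod_of_pos hn]
            have heq : i + st = (i + st - n) + n * 1 := by omega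
            rw [heq, Int.add_mul_emod_self_left]
            have hv := Int.emod_eq_of_lt (a := i + st - n) (b := n) (by omega) (by omega); omega
          refine ⟨i + st - n, ⟨by omega, by omega⟩, i, ⟨by omega, hi.2⟩, ?_, ?_⟩
          · left; omega
          · rw [hm, pvSortPair_comm]
      · -- antipodal edge (i, i + q), i < q
        refine ⟨i, ⟨hi.1, by omega⟩, i + q, ⟨by omega, by omega⟩,
          Or.inr ⟨hodd, by omega⟩, by simp⟩
    · rintro ⟨i, hi, j, hj, hcond, rfl⟩
      rcases hcond with hd | ⟨_, hap⟩
      · by_cases hle : j - i ≤ half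
        · exact Or.inl ⟨i, ⟨hi.1, by omega⟩, j - i, ⟨by omega, by omega⟩, by
            have hm : PySem.Int.mod (i + (j - i)) n = j := by
              rw [PySem.Int.mod_eq_emod_of_pos hn]
              have : i + (j - i) = j := by omega
              rw [this]; apply Int.emod_eq_of_lt <;> omega
            rw [hm]⟩
        · have hle2 : n - (j - i) ≤ half := by omega
          refine Or.inl ⟨j, ⟨by omega, hj.2⟩, n - (j - i), ⟨by omega, by omega⟩, ?_⟩
          have hm : PySem.Int.mod (j + (n - (j - i))) n = i := by
            rw [PySem.Int.mod_eq_emod_of_pos hn]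
            have heq : j + (n - (j - i)) = i + n * 1 := by omega
            rw [heq, Int.add_mul_emod_self_left]
            apply Int.emod_eq_of_lt <;> omega
          rw [hm, pvSortPair_comm]
      · refine Or.inr ⟨i, ⟨hi.1, by omega⟩, ?_⟩
        have : i + q = j := by omega
        rw [this]
  · rw [if_neg hodd]
    have hcond : ∀ j i : Int, (min (j - i) (n - (j - i)) ≤ half
        ∨ (PySem.Int.mod degree 2 = 1 ∧ 2 * (j - i) = n)) ↔ min (j - i) (n - (j - i)) ≤ half := by
      intro j i
      constructor
      · rintro (h | ⟨h, _⟩)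
        · exact h
        · exact absurd h hodd
      · exact Or.inl
    refine (List.perm_ext_iff_of_nodup
      (pv_nodup_foldl_foldl_add _ _ _ _ List.nodup_nil)
      (pv_nodup_foldl_foldl_addIf _ _ _ _ _ List.nodup_nil)).mpr ?_
    intro x
    simp only [pv_mem_foldl_foldl_add, pv_mem_foldl_foldl_addIf,
      PySem.List.mem_pyRange_one, List.not_mem_nil, false_or]
    constructor
    · rintro ⟨i, hi, st, hst, rfl⟩
      have hstn : st < n := by omega
      by_cases hlt : i + st < n
      · have hm : PySem.Int.mod (i + st) n = i + st := by
          rw [PySem.Int.mod_eq_emod_of_pos hn]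
          apply Int.emod_eq_of_lt <;> omega
        refine ⟨i, ⟨hi.1, by omega⟩, i + st, ⟨by omega, by omega⟩, Or.inl ?_, by rw [hm]⟩
        simp only [add_sub_cancel_left]; omega
      · have hm : PySem.Int.mod (i + st) n = i + st - n := by
          rw [PySem.Int.mod_eq_emod_of_pos hn]
          have heq : i + st = (i + st - n) + n * 1 := by omega
          rw [heq, Int.add_mul_emod_self_left]
          have hv := Int.emod_eq_of_lt (a := i + st - n) (b := n) (by omega) (by omega); omega
        refine ⟨i + st - n, ⟨by omega, by omega⟩, i, ⟨by omega, hi.2⟩, ?_, ?_⟩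
        · left; omega
        · rw [hm, pvSortPair_comm]
    · rintro ⟨i, hi, j, hj, hc, rfl⟩
      rw [hcond] at hc
      by_cases hle : j - i ≤ half
      · exact ⟨i, ⟨hi.1, by omega⟩, j - i, ⟨by omega, by omega⟩, by
          have hm : PySem.Int.mod (i + (j - i)) n = j := by
            rw [PySem.Int.mod_eq_emod_of_pos hn]
            have : i + (j - i) = j := by omega
            rw [this]; apply Int.emod_eq_of_lt <;> omega
          rw [hm]⟩
      · have hle2 : n - (j - i) ≤ half := by omega
        refine ⟨j, ⟨by omega, hj.2⟩, n - (j - i), ⟨by omega, by omega⟩, ?_⟩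
        have hm : PySem.Int.mod (j + (n - (j - i))) n = i := by
          rw [PySem.Int.mod_eq_emod_of_pos hn]
          have heq : j + (n - (j - i)) = i + n * 1 := by omega
          rw [heq, Int.add_mul_emod_self_left]
          apply Int.emod_eq_of_lt <;> omega
        rw [hm, pvSortPair_comm]
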